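-- pv_equiv track=rewrite | github.com/lawang24/competitive-programming-archive | Codeforces/sept2024/edu168D.py | solve
-- ===== SOURCE A (Python) =====
-- import math
--
-- def solve(graph, values):
--
--     def helper(node):
--         # no children
--         if not graph[node]:
--             return values[node]
--         _min = math.inf
--         for child in graph[node]:
--             _min = min(_min, helper(child))
--         if values[node] > _min:
--             return _min
--         return (_min+values[node])//2
--
--     if not graph[0]:
--         return values[0]
--
--     return values[0] + min(helper(child) for child in graph[0])
-- ===== SOURCE B (Python) =====
-- def solve(graph, values):
--     roots = graph[0]
--     if not roots:
--         return values[0]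
--     # collect every node reachable from the roots: a growing worklist scanned by index
--     reach = []
--     for r in roots:
--         if r not in reach:
--             reach.append(r)
--     i = 0
--     while i < len(reach):
--         for c in graph[reach[i]]:
--             if c not in reach:
--                 reach.append(c)
--         i += 1
--     # saturating rounds: resolve every reachable node whose children are all resolved
--     res = {}
--     for _ in range(len(graph)):
--         for n in reach:
--             if n not in res:
--                 kids = graph[n]
--                 if not kids:
--                     res[n] = values[n]
--                 elif all(c in res for c in kids):
--                     m = min(res[c] for c in kids)
--                     res[n] = m if values[n] > m else (m + values[n]) // 2
--     return values[0] + min(res[r] for r in roots)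
-- ===== Notes on version B (the rewrite author's own statement) =====
-- stated objective: alternative
-- what changed: Replaces A's top-down unmemoized recursion with an iterative two-phase algorithm: a worklist pass collects every node reachable from graph[0], then saturating rounds over that set resolve each node once from its already-resolved children, so each shared node is evaluated once instead of once per reference.
import Mathlib
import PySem

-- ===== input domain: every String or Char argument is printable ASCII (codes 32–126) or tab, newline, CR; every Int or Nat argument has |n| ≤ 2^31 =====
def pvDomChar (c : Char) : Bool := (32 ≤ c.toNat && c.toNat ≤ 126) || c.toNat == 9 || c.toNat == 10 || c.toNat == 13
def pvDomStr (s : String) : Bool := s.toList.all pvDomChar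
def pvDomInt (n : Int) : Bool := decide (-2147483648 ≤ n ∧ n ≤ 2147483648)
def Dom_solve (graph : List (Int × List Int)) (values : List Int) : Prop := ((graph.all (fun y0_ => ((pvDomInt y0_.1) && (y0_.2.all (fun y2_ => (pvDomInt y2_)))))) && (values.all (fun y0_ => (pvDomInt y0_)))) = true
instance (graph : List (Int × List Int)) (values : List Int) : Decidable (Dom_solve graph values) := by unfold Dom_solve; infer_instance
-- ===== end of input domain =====

-- B replaces A's top-down unmemoized recursion by an iterative two-phase pass (collect the
-- reachable nodes with a worklist, then resolve them in saturating rounds); equivalence of the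
-- return values is proved on Pre_solve below (exactly the inputs where the Python A terminates
-- without an exception).

-- graph[node] (Python dict lookup, first match); the [] default is only reached outside Pre_solve (KeyError)
def pvKids (graph : List (Int × List Int)) (node : Int) : List Int :=
  ((graph.find? (fun p => p.1 == node)).map Prod.snd).getD []

-- values[node] (negative indices wrap); the 0 default is only reached outside Pre_solve (IndexError)
def pvVal (values : List Int) (node : Int) : Int := PySem.List.pyGetD values node 0

-- ===== PORT A =====
-- helper(node), with fuel for termination; on Pre_solve inputs every recursion path has length
-- ≤ graph.length (a longer path repeats a dict key, i.e. a cycle), so fuel graph.length suffices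
def pvHelpA (graph : List (Int × List Int)) (values : List Int) : Nat → Int → Int
  | 0, _ => 0
  | f + 1, node =>
    match pvKids graph node with
    | [] => pvVal values node
    | c :: cs =>
      -- _min = math.inf; for child in graph[node]: _min = min(_min, helper(child))   (none = inf)
      match (c :: cs).foldl
          (fun acc ch => some (match acc with
            | none => pvHelpA graph values f ch
            | some m => min m (pvHelpA graph values f ch))) (none : Option Int) with
      | none => 0   -- unreachable: the child list is nonempty
      | some m =>
        if pvVal values node > m then m
        else PySem.Int.floordiv (m + pvVal values node) 2

def solve (graph : List (Int × List Int)) (values : List Int) : Int :=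
  match pvKids graph 0 with
  | [] => pvVal values 0
  | c :: cs =>
    -- values[0] + min(helper(child) for child in graph[0])
    pvVal values 0 +
      (cs.map (pvHelpA graph values graph.length)).foldl min (pvHelpA graph values graph.length c)

-- ===== PORT B =====
-- for c in cs: if c not in reach: reach.append(c)
def pvAddNew (reach : List Int) : List Int → List Int
  | [] => reach
  | c :: cs => pvAddNew (if c ∈ reach then reach else reach ++ [c]) cs

-- while i < len(reach): append unseen children of reach[i]; i += 1   (fuel: the worklist holds
-- distinct elements drawn from the child lists, so pvFuelB iterations always suffice on Pre_solve)
def pvBfs (graph : List (Int × List Int)) : Nat → Nat → List Int → List Int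
  | 0, _, reach => reach
  | f + 1, i, reach =>
    if h : i < reach.length then
      pvBfs graph f (i + 1) (pvAddNew reach (pvKids graph reach[i]))
    else reach

def pvFuelB (graph : List (Int × List Int)) (roots : List Int) : Nat :=
  roots.length + (graph.map (fun p => p.2.length)).sum + 2

-- the body of 'for n in reach' inside one round
def pvResolve1 (graph : List (Int × List Int)) (values : List Int)
    (res : PySem.Dict Int Int) (n : Int) : PySem.Dict Int Int :=
  if (res.get? n).isSome then res
  else
    match pvKids graph n with
    | [] => res.insert n (pvVal values n)
    | c :: cs =>
      if (c :: cs).all (fun k => (res.get? k).isSome) then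
        let m := (cs.map (fun k => res.getD k 0)).foldl min (res.getD c 0)
        res.insert n (if pvVal values n > m then m else PySem.Int.floordiv (m + pvVal values n) 2)
      else res

def solve_alt (graph : List (Int × List Int)) (values : List Int) : Int :=
  match pvKids graph 0 with
  | [] => pvVal values 0
  | c :: cs =>
    let reach := pvBfs graph (pvFuelB graph (c :: cs)) 0 (pvAddNew [] (c :: cs))
    let res := (List.range graph.length).foldl
        (fun acc _ => reach.foldl (pvResolve1 graph values) acc) PySem.Dict.empty
    pvVal values 0 + (cs.map (fun k => res.getD k 0)).foldl min (res.getD c 0)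

-- ===== PRECONDITION & SPEC =====
-- pvOk f n: every path from n of length < f stays on dict keys whose value index is in range,
-- and no path reaches length f — a bounded-unfolding property of the input graph only.
def pvOk (graph : List (Int × List Int)) (values : List Int) : Nat → Int → Bool
  | 0, _ => false
  | f + 1, n =>
    graph.any (fun p => p.1 == n)
      && decide (-(values.length : Int) ≤ n ∧ n < (values.length : Int))
      && (pvKids graph n).all (fun c => pvOk graph values f c)

-- Pre_solve holds exactly where the Python A returns: 0 is a key, values[0] exists, and (with
-- fuel graph.length, enough iff no reachable cycle: a longer path repeats a key) every node
-- reachable from graph[0] is a key with an in-range value index.  It excludes only inputs where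
-- A raises (KeyError, IndexError, RecursionError on a reachable cycle).
def Pre_solve (graph : List (Int × List Int)) (values : List Int) : Prop :=
  graph.any (fun p => p.1 == 0) = true ∧ values ≠ [] ∧
  (pvKids graph 0).all (fun c => pvOk graph values graph.length c) = true
instance (graph : List (Int × List Int)) (values : List Int) : Decidable (Pre_solve graph values) := by
  unfold Pre_solve; infer_instance

def pvWitness_solve : (List (Int × List Int)) × List Int :=
  ([(0, [1, 2]), (1, []), (2, [])], [5, 3, 4])

def Spec_solve (graph : List (Int × List Int)) (values : List Int) (out : Int) : Prop := out = solve_alt graph values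
instance (graph : List (Int × List Int)) (values : List Int) (out : Int) : Decidable (Spec_solve graph values out) := by unfold Spec_solve; infer_instance

-- ===== CLAIM (what is proved, stated in full; the proofs are below) =====
def Claim_equal_solve : Prop := ∀ (graph : List (Int × List Int)) (values : List Int), Dom_solve graph values → Pre_solve graph values → Spec_solve graph values (solve graph values)

-- ===== LEMMAS AND PROOFS =====

-- the canonical value of A's helper at a node (the fuel solve itself uses)
def pvHv (graph : List (Int × List Int)) (values : List Int) (n : Int) : Int :=
  pvHelpA graph values graph.length n

theorem pvOk_succ (graph : List (Int × List Int)) (values : List Int) (f : Nat) (n : Int) :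
    pvOk graph values (f + 1) n =
      (graph.any (fun p => p.1 == n)
        && decide (-(values.length : Int) ≤ n ∧ n < (values.length : Int))
        && (pvKids graph n).all (fun c => pvOk graph values f c)) := rfl

theorem pvOk_mono (graph : List (Int × List Int)) (values : List Int) :
    ∀ (f : Nat) (n : Int), pvOk graph values f n = true → pvOk graph values (f + 1) n = true := by
  intro f
  induction f with
  | zero => intro n h; simp [pvOk] at h
  | succ f ih =>
    intro n h
    rw [pvOk_succ] at h ⊢
    simp only [Bool.and_eq_true, List.all_eq_true] at h ⊢
    exact ⟨h.1, fun c hc => ih c (h.2 c hc)⟩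

theorem pvOk_le (graph : List (Int × List Int)) (values : List Int) {f g : Nat} (hfg : f ≤ g) :
    ∀ n : Int, pvOk graph values f n = true → pvOk graph values g n = true := by
  induction g with
  | zero =>
    intro n h
    have hf : f = 0 := by omega
    subst hf; exact h
  | succ g ih =>
    intro n h
    rcases Nat.lt_or_ge f (g + 1) with hlt | hge
    · exact pvOk_mono graph values g n (ih (by omega) n h)
    · have : f = g + 1 := by omega
      subst this; exact h

theorem pvOk_kids (graph : List (Int × List Int)) (values : List Int) {f : Nat} {n : Int}
    (h : pvOk graph values (f + 1) n = true) :
    ∀ c ∈ pvKids graph n, pvOk graph values f c = true := by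
  simp only [pvOk, Bool.and_eq_true, List.all_eq_true] at h
  exact h.2

theorem pvOk_pos (graph : List (Int × List Int)) (values : List Int) {f : Nat} {n : Int}
    (h : pvOk graph values f n = true) : 1 ≤ f := by
  cases f with
  | zero => simp [pvOk] at h
  | succ f => omega

theorem pvFoldA_congr {h1 h2 : Int → Int} {cs : List Int}
    (hc : ∀ c ∈ cs, h1 c = h2 c) : ∀ a : Option Int,
    cs.foldl (fun acc ch => some (match acc with
      | none => h1 ch | some m => min m (h1 ch))) a
    = cs.foldl (fun acc ch => some (match acc with
      | none => h2 ch | some m => min m (h2 ch))) a := by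
  induction cs with
  | nil => intro a; rfl
  | cons c cs ih =>
    intro a
    have hcc := hc c (by simp)
    have hcs : ∀ c ∈ cs, h1 c = h2 c := fun c hm => hc c (by simp [hm])
    simp only [List.foldl_cons, hcc]
    exact ih hcs _

theorem pvFoldA_some (h : Int → Int) : ∀ (cs : List Int) (m : Int),
    cs.foldl (fun acc ch => some (match acc with
      | none => h ch | some m => min m (h ch))) (some m)
    = some ((cs.map h).foldl min m) := by
  intro cs
  induction cs with
  | nil => intro m; rfl
  | cons c cs ih => intro m; simp only [List.foldl_cons, List.map_cons]; exact ih _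

theorem pvFoldA_none (h : Int → Int) (c : Int) (cs : List Int) :
    (c :: cs).foldl (fun acc ch => some (match acc with
      | none => h ch | some m => min m (h ch))) none
    = some ((cs.map h).foldl min (h c)) := by
  simp only [List.foldl_cons]
  exact pvFoldA_some h cs (h c)

theorem pvStab (graph : List (Int × List Int)) (values : List Int) :
    ∀ (f : Nat) (n : Int), pvOk graph values f n = true →
    ∀ (a b : Nat), f ≤ a → f ≤ b → pvHelpA graph values a n = pvHelpA graph values b n := by
  intro f
  induction f with
  | zero => intro n h; simp [pvOk] at h
  | succ f ih =>
    intro n h a b ha hb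
    obtain ⟨a, rfl⟩ : ∃ a', a = a' + 1 := ⟨a - 1, by omega⟩
    obtain ⟨b, rfl⟩ : ∃ b', b = b' + 1 := ⟨b - 1, by omega⟩
    simp only [pvHelpA]
    cases hcs : pvKids graph n with
    | nil => rfl
    | cons c cs =>
      have hok := pvOk_kids graph values h
      rw [hcs] at hok
      have hcong : ∀ ch ∈ c :: cs, pvHelpA graph values a ch = pvHelpA graph values b ch :=
        fun ch hm => ih ch (hok ch hm) a b (by omega) (by omega)
      dsimp only
      rw [pvFoldA_congr hcong]

theorem pvHv_leaf {graph : List (Int × List Int)} {values : List Int} {n : Int}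
    (h : pvOk graph values graph.length n = true) (hcs : pvKids graph n = []) :
    pvHv graph values n = pvVal values n := by
  obtain ⟨L, hL⟩ : ∃ L, graph.length = L + 1 := ⟨graph.length - 1, by
    have := pvOk_pos graph values h; omega⟩
  rw [pvHv, hL]
  simp only [pvHelpA, hcs]

theorem pvHv_cons {graph : List (Int × List Int)} {values : List Int} {n c : Int} {cs : List Int}
    (h : pvOk graph values graph.length n = true) (hcs : pvKids graph n = c :: cs) :
    pvHv graph values n =
      (if pvVal values n > ((cs.map (pvHv graph values)).foldl min (pvHv graph values c))
       then ((cs.map (pvHv graph values)).foldl min (pvHv graph values c))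
       else PySem.Int.floordiv (((cs.map (pvHv graph values)).foldl min (pvHv graph values c))
              + pvVal values n) 2) := by
  obtain ⟨L, hL⟩ : ∃ L, graph.length = L + 1 := ⟨graph.length - 1, by
    have := pvOk_pos graph values h; omega⟩
  rw [pvHv, hL]
  simp only [pvHelpA, hcs]
  have hok := pvOk_kids graph values (hL ▸ h)
  rw [hcs] at hok
  have hcong : ∀ ch ∈ c :: cs, pvHelpA graph values L ch = pvHv graph values ch := by
    intro ch hm
    rw [pvHv]
    exact pvStab graph values L ch (hok ch hm) L graph.length le_rfl (by omega)
  rw [pvFoldA_congr hcong, pvFoldA_none]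

theorem pvAddNew_mem : ∀ (cs reach : List Int) (x : Int),
    x ∈ pvAddNew reach cs ↔ x ∈ reach ∨ x ∈ cs := by
  intro cs
  induction cs with
  | nil => simp [pvAddNew]
  | cons c cs ih =>
    intro reach x
    simp only [pvAddNew]
    by_cases h : c ∈ reach
    · rw [if_pos h, ih]
      constructor
      · rintro (hx | hx)
        · exact Or.inl hx
        · exact Or.inr (by simp [hx])
      · rintro (hx | hx)
        · exact Or.inl hx
        · rcases List.mem_cons.1 hx with rfl | hx
          · exact Or.inl h
          · exact Or.inr hx
    · rw [if_neg h, ih]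
      simp [List.mem_append, or_assoc]

theorem pvAddNew_nodup : ∀ (cs reach : List Int), reach.Nodup → (pvAddNew reach cs).Nodup := by
  intro cs
  induction cs with
  | nil => intro reach h; exact h
  | cons c cs ih =>
    intro reach h
    simp only [pvAddNew]
    by_cases hc : c ∈ reach
    · rw [if_pos hc]; exact ih reach h
    · rw [if_neg hc]
      refine ih _ ?_
      rw [List.nodup_append]
      exact ⟨h, List.nodup_singleton c, fun a ha b hb => by
        simp only [List.mem_singleton] at hb
        subst hb; exact fun hab => hc (hab ▸ ha)⟩

theorem pvAddNew_append : ∀ (cs reach : List Int), ∃ t, pvAddNew reach cs = reach ++ t := by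
  intro cs
  induction cs with
  | nil => intro reach; exact ⟨[], by simp [pvAddNew]⟩
  | cons c cs ih =>
    intro reach
    simp only [pvAddNew]
    by_cases hc : c ∈ reach
    · rw [if_pos hc]; exact ih reach
    · rw [if_neg hc]
      obtain ⟨t, ht⟩ := ih (reach ++ [c])
      exact ⟨c :: t, by simp [ht]⟩

theorem pvKids_sub_pool (graph : List (Int × List Int)) (n : Int) :
    ∀ c ∈ pvKids graph n, c ∈ graph.flatMap (fun p => p.2) := by
  intro c hc
  unfold pvKids at hc
  cases hfind : graph.find? (fun p => p.1 == n) with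
  | none => rw [hfind] at hc; simp at hc
  | some p =>
    rw [hfind] at hc
    simp only [Option.map_some, Option.getD_some] at hc
    exact List.mem_flatMap.2 ⟨p, List.mem_of_find?_eq_some hfind, hc⟩

theorem pvNodup_length_le {l pool : List Int} (hnd : l.Nodup) (hsub : ∀ x ∈ l, x ∈ pool) :
    l.length ≤ pool.length := by
  classical
  calc l.length = l.toFinset.card := (List.toFinset_card_of_nodup hnd).symm
    _ ≤ pool.toFinset.card := Finset.card_le_card (fun x hx => by
        simp only [List.mem_toFinset] at hx ⊢; exact hsub x hx)
    _ ≤ pool.length := pool.toFinset_card_le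

theorem pvBfs_spec (graph : List (Int × List Int)) (values : List Int) :
    ∀ (f i : Nat) (reach : List Int),
    reach.Nodup →
    (∀ x ∈ reach, pvOk graph values graph.length x = true) →
    (∀ x ∈ reach, x ∈ graph.flatMap (fun p => p.2)) →
    (∀ j : Nat, j < i → ∀ x : Int, reach[j]? = some x → ∀ c ∈ pvKids graph x, c ∈ reach) →
    (graph.flatMap (fun p => p.2)).length + 2 ≤ f + i →
    (∀ x ∈ reach, x ∈ pvBfs graph f i reach) ∧
    (∀ n ∈ pvBfs graph f i reach, pvOk graph values graph.length n = true) ∧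
    (∀ n ∈ pvBfs graph f i reach, ∀ c ∈ pvKids graph n, c ∈ pvBfs graph f i reach) := by
  intro f
  induction f with
  | zero =>
    intro i reach hnd hok hsub hcl hfuel
    have hlen : reach.length ≤ (graph.flatMap (fun p => p.2)).length := pvNodup_length_le hnd hsub
    simp only [pvBfs]
    refine ⟨fun x hx => hx, hok, ?_⟩
    intro n hn c hc
    obtain ⟨j, hj, hget⟩ := List.mem_iff_getElem.1 hn
    exact hcl j (by omega) n (by rw [List.getElem?_eq_getElem hj, hget]) c hc
  | succ f ih =>
    intro i reach hnd hok hsub hcl hfuel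
    by_cases h : i < reach.length
    · simp only [pvBfs, dif_pos h]
      have hni : reach[i] ∈ reach := List.getElem_mem h
      have hoki : pvOk graph values graph.length reach[i] = true := hok _ hni
      obtain ⟨L, hL⟩ : ∃ L, graph.length = L + 1 := ⟨graph.length - 1, by
        have := pvOk_pos graph values hoki; omega⟩
      have hkidsok : ∀ c ∈ pvKids graph reach[i], pvOk graph values graph.length c = true := by
        intro c hc
        have := pvOk_kids graph values (hL ▸ hoki) c hc
        exact pvOk_le graph values (by omega) c this
      obtain ⟨t, ht⟩ := pvAddNew_append (pvKids graph reach[i]) reach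
      have hsup : ∀ x ∈ reach, x ∈ pvAddNew reach (pvKids graph reach[i]) :=
        fun x hx => (pvAddNew_mem _ _ _).2 (Or.inl hx)
      have := ih (i + 1) (pvAddNew reach (pvKids graph reach[i]))
        (pvAddNew_nodup _ _ hnd)
        (by
          intro x hx
          rcases (pvAddNew_mem _ _ _).1 hx with hx | hx
          · exact hok x hx
          · exact hkidsok x hx)
        (by
          intro x hx
          rcases (pvAddNew_mem _ _ _).1 hx with hx | hx
          · exact hsub x hx
          · exact pvKids_sub_pool graph reach[i] x hx)
        (by
          intro j hji x hx c hc
          have hjr : j < reach.length := by omega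
          rw [ht, List.getElem?_append_left hjr, List.getElem?_eq_getElem hjr,
            Option.some_inj] at hx
          rcases Nat.lt_or_ge j i with hlt | hge
          · exact hsup c (hcl j hlt x (by rw [List.getElem?_eq_getElem hjr, hx]) c hc)
          · have hji' : j = i := by omega
            subst hji'
            subst hx
            exact (pvAddNew_mem _ _ _).2 (Or.inr hc))
        (by omega)
      exact ⟨fun x hx => this.1 x (hsup x hx), this.2.1, this.2.2⟩
    · simp only [pvBfs, dif_neg h]
      refine ⟨fun x hx => hx, hok, ?_⟩
      intro n hn c hc
      obtain ⟨j, hj, hget⟩ := List.mem_iff_getElem.1 hn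
      exact hcl j (by omega) n (by rw [List.getElem?_eq_getElem hj, hget]) c hc

-- res only ever holds canonical values and existing entries persist
theorem pvResolve1_mono (graph : List (Int × List Int)) (values : List Int)
    (res : PySem.Dict Int Int) (n k : Int) (v : Int)
    (h : res.get? k = some v) : (pvResolve1 graph values res n).get? k = some v := by
  have hkn : (res.get? n).isSome = false → k ≠ n := by
    intro hn rfl; rw [h] at hn; simp at hn
  unfold pvResolve1
  cases hn : (res.get? n).isSome with
  | true => simpa using h
  | false =>
    simp only [Bool.false_eq_true, if_false]
    have hne : k ≠ n := hkn hn
    cases hcs : pvKids graph n with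
    | nil => rw [PySem.Dict.get?_insert]; simp [hne, h]
    | cons c cs =>
      by_cases hall : ((c :: cs).all (fun k => (res.get? k).isSome)) = true
      · simp only [hall, if_true]
        rw [PySem.Dict.get?_insert]; simp [hne, h]
      · simp only [hall]
        exact h

theorem pvFoldResolve_mono (graph : List (Int × List Int)) (values : List Int) :
    ∀ (l : List Int) (res : PySem.Dict Int Int) (k : Int) (v : Int),
    res.get? k = some v → ((l.foldl (pvResolve1 graph values) res).get? k = some v) := by
  intro l
  induction l with
  | nil => intro res k v h; exact h
  | cons a l ih =>
    intro res k v h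
    simp only [List.foldl_cons]
    exact ih _ k v (pvResolve1_mono graph values res a k v h)

theorem pvResolve1_good (graph : List (Int × List Int)) (values : List Int)
    (res : PySem.Dict Int Int) (n : Int)
    (hok : pvOk graph values graph.length n = true)
    (hgood : ∀ (k v : Int), res.get? k = some v → v = pvHv graph values k) :
    ∀ (k v : Int), (pvResolve1 graph values res n).get? k = some v → v = pvHv graph values k := by
  intro k v
  unfold pvResolve1
  cases hn : (res.get? n).isSome with
  | true => simpa using hgood k v
  | false =>
    simp only [Bool.false_eq_true, if_false]
    cases hcs : pvKids graph n with
    | nil =>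
      dsimp only
      by_cases hkn : k = n
      · subst hkn
        rw [PySem.Dict.get?_insert_self, Option.some_inj]
        intro hv
        rw [← hv, pvHv_leaf hok hcs]
      · intro hg
        rw [PySem.Dict.get?_insert, if_neg hkn] at hg
        exact hgood k v hg
    | cons c cs =>
      dsimp only
      by_cases hall : ((c :: cs).all (fun k => (res.get? k).isSome)) = true
      · simp only [hall, if_true]
        have hgetD : ∀ ch ∈ c :: cs, res.getD ch 0 = pvHv graph values ch := by
          intro ch hch
          have := List.all_eq_true.1 hall ch hch
          obtain ⟨w, hw⟩ := Option.isSome_iff_exists.1 this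
          rw [PySem.Dict.getD_eq_get?_getD, hw]
          exact hgood ch w hw
        have hmap : cs.map (fun ch => res.getD ch 0) = cs.map (pvHv graph values) :=
          List.map_congr_left (fun ch hch => hgetD ch (by simp [hch]))
        by_cases hkn : k = n
        · subst hkn
          rw [PySem.Dict.get?_insert_self, Option.some_inj]
          intro hv
          rw [← hv, pvHv_cons hok hcs]
          rw [hmap, hgetD c (by simp)]
        · intro hg
          rw [PySem.Dict.get?_insert, if_neg hkn] at hg
          exact hgood k v hg
      · simp only [hall]
        exact hgood k v

theorem pvFoldResolve_good (graph : List (Int × List Int)) (values : List Int) :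
    ∀ (l : List Int) (res : PySem.Dict Int Int),
    (∀ n ∈ l, pvOk graph values graph.length n = true) →
    (∀ (k v : Int), res.get? k = some v → v = pvHv graph values k) →
    ∀ (k v : Int), ((l.foldl (pvResolve1 graph values) res).get? k = some v) →
      v = pvHv graph values k := by
  intro l
  induction l with
  | nil => intro res _ hgood; exact hgood
  | cons a l ih =>
    intro res hl hgood
    simp only [List.foldl_cons]
    exact ih _ (fun n hn => hl n (by simp [hn]))
      (pvResolve1_good graph values res a (hl a (by simp)) hgood)

theorem pvResolve1_sets (graph : List (Int × List Int)) (values : List Int)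
    (res : PySem.Dict Int Int) (n : Int)
    (hkids : ∀ c ∈ pvKids graph n, (res.get? c).isSome = true) :
    ((pvResolve1 graph values res n).get? n).isSome = true := by
  unfold pvResolve1
  cases hn : (res.get? n).isSome with
  | true => simpa using hn
  | false =>
    simp only [Bool.false_eq_true, if_false]
    cases hcs : pvKids graph n with
    | nil => dsimp only; rw [PySem.Dict.get?_insert_self]; rfl
    | cons c cs =>
      dsimp only
      have hall : ((c :: cs).all (fun k => (res.get? k).isSome)) = true :=
        List.all_eq_true.2 (fun ch hch => hkids ch (hcs ▸ hch))
      simp only [hall, if_true]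
      rw [PySem.Dict.get?_insert_self]; rfl

theorem pvFoldResolve_sets (graph : List (Int × List Int)) (values : List Int) :
    ∀ (l : List Int) (res : PySem.Dict Int Int) (n : Int), n ∈ l →
    (∀ c ∈ pvKids graph n, (res.get? c).isSome = true) →
    (((l.foldl (pvResolve1 graph values) res).get? n).isSome = true) := by
  intro l
  induction l with
  | nil => intro res n hn; simp at hn
  | cons a l ih =>
    intro res n hn hkids
    simp only [List.foldl_cons]
    by_cases han : a = n
    · subst han
      have h1 := pvResolve1_sets graph values res a hkids
      obtain ⟨w, hw⟩ := Option.isSome_iff_exists.1 h1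
      rw [pvFoldResolve_mono graph values l _ a w hw]; rfl
    · have hnl : n ∈ l := by
        rcases List.mem_cons.1 hn with h | h
        · exact absurd h.symm han
        · exact h
      apply ih _ n hnl
      intro c hc
      obtain ⟨w, hw⟩ := Option.isSome_iff_exists.1 (hkids c hc)
      rw [pvResolve1_mono graph values res a c w hw]; rfl

-- the dict after t rounds
def pvRt (graph : List (Int × List Int)) (values : List Int) (reach : List Int) :
    Nat → PySem.Dict Int Int
  | 0 => PySem.Dict.empty
  | t + 1 => reach.foldl (pvResolve1 graph values) (pvRt graph values reach t)

theorem pvRt_eq_range (graph : List (Int × List Int)) (values : List Int) (reach : List Int) :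
    ∀ t : Nat, (List.range t).foldl
      (fun acc _ => reach.foldl (pvResolve1 graph values) acc) PySem.Dict.empty
      = pvRt graph values reach t := by
  intro t
  induction t with
  | zero => rfl
  | succ t ih =>
    rw [List.range_succ, List.foldl_append, ih]
    rfl

theorem pvRt_good (graph : List (Int × List Int)) (values : List Int) (reach : List Int)
    (hokall : ∀ x ∈ reach, pvOk graph values graph.length x = true) :
    ∀ (t : Nat) (k v : Int), (pvRt graph values reach t).get? k = some v →
      v = pvHv graph values k := by
  intro t
  induction t with
  | zero => intro k v h; simp [pvRt, PySem.Dict.get?_empty] at h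
  | succ t ih =>
    exact pvFoldResolve_good graph values reach _ hokall ih

theorem pvRt_sets (graph : List (Int × List Int)) (values : List Int) (reach : List Int)
    (hcl : ∀ n ∈ reach, ∀ c ∈ pvKids graph n, c ∈ reach) :
    ∀ (t : Nat) (n : Int), n ∈ reach → pvOk graph values t n = true →
      (((pvRt graph values reach t).get? n).isSome = true) := by
  intro t
  induction t with
  | zero => intro n _ h; simp [pvOk] at h
  | succ t ih =>
    intro n hn hok
    apply pvFoldResolve_sets graph values reach _ n hn
    intro c hc
    exact ih c (hcl n hn c hc) (pvOk_kids graph values hok c hc)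

-- ===== VERDICT (by name: the statement is the Claim_ definition above) =====
theorem solve_spec : Claim_equal_solve := by
  intro graph values hdom hpre
  obtain ⟨hk0, hvne, hall⟩ := hpre
  unfold Spec_solve solve solve_alt
  cases hcs : pvKids graph 0 with
  | nil => rfl
  | cons c cs =>
    have hallok : ∀ ch ∈ c :: cs, pvOk graph values graph.length ch = true := by
      rw [hcs] at hall
      exact List.all_eq_true.1 hall
    have hbfs := pvBfs_spec graph values (pvFuelB graph (c :: cs)) 0 (pvAddNew [] (c :: cs))
      (pvAddNew_nodup _ _ List.nodup_nil)
      (by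
        intro x hx
        rcases (pvAddNew_mem _ _ _).1 hx with hx | hx
        · simp at hx
        · exact hallok x hx)
      (by
        intro x hx
        rcases (pvAddNew_mem _ _ _).1 hx with hx | hx
        · simp at hx
        · exact pvKids_sub_pool graph 0 x (hcs ▸ hx))
      (by intro j hj; exact absurd hj (Nat.not_lt_zero j))
      (by
        have : (graph.flatMap (fun p => p.2)).length = (graph.map (fun p => p.2.length)).sum := by
          rw [List.length_flatMap]
        rw [this]
        unfold pvFuelB
        omega)
    obtain ⟨hsup, hokR, hclR⟩ := hbfs
    have hmemR : ∀ ch ∈ c :: cs, ch ∈ pvBfs graph (pvFuelB graph (c :: cs)) 0 (pvAddNew [] (c :: cs)) :=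
      fun ch hch => hsup ch ((pvAddNew_mem _ _ _).2 (Or.inr hch))
    have hres : ∀ ch ∈ c :: cs,
        ((pvRt graph values (pvBfs graph (pvFuelB graph (c :: cs)) 0 (pvAddNew [] (c :: cs)))
          graph.length).getD ch 0) = pvHv graph values ch := by
      intro ch hch
      have hsome := pvRt_sets graph values _ hclR graph.length ch (hmemR ch hch) (hallok ch hch)
      obtain ⟨w, hw⟩ := Option.isSome_iff_exists.1 hsome
      rw [PySem.Dict.getD_eq_get?_getD, hw]
      exact pvRt_good graph values _ hokR graph.length ch w hw
    simp only [pvRt_eq_range]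
    rw [List.map_congr_left (fun ch hch => hres ch (by simp [hch])), hres c (by simp)]
    rfl
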